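-- pv_equiv track=rewrite | github.com/leemiyinghao/anime-sub-translate | format/ssa_format.py | _split_by_formatting
-- ===== SOURCE A (Python) =====
-- def _split_by_formatting(content: str) -> list[tuple[str, bool]]:
--     """
--     Split the SSA subtitle content by any formatting like {\\i}.
--     :param content: The SSA subtitle content.
--     :return: The split content, containing tuples of (text, is_formatting).
--     """
--
--     # Regex can not handle nested formatting, hence we use a simple parser
--     stack = []
--     breakpoints: list[tuple[int, int]] = []
--     for i, c in enumerate(content):
--         if c == "{":
--             stack.append(i)
--         elif c == "}" and (len(stack) > 0):
--             if ((existed := stack.pop()) is not None) and len(stack) == 0: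
--                 breakpoints.append((existed, i + 1))
--         else:
--             pass
--
--     sections = []
--     step = 0
--     for start, end in breakpoints:
--         # Split the content into sections
--         sections.append((content[step:start], False))
--         sections.append((content[start:end], True))
--         step = end
--     sections.append((content[step:], False))
--
--     # Remove empty sections
--     sections = [(s, i) for s, i in sections if len(s) > 0]
--
--     sections = sections
--
--     return sections
-- ===== SOURCE B (Python) =====
-- def _split_by_formatting(content: str) -> list[tuple[str, bool]]:
--     """
--     Split the SSA subtitle content by any formatting like {\\i}.
--     Single streaming pass with a depth counter instead of a stack,
--     breakpoints list and filtering pass.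
--     """
--     sections = []
--     depth = 0
--     format_start = 0
--     text_start = 0
--     for i, c in enumerate(content):
--         if c == "{":
--             if depth == 0:
--                 format_start = i
--             depth += 1
--         elif c == "}" and depth > 0:
--             depth -= 1
--             if depth == 0:
--                 if text_start < format_start:
--                     sections.append((content[text_start:format_start], False))
--                 sections.append((content[format_start:i + 1], True))
--                 text_start = i + 1
--     if text_start < len(content):
--         sections.append((content[text_start:], False))
--     return sections
-- ===== Notes on version B (the rewrite author's own statement) =====
-- stated objective: simpler
-- what changed: Replaces the index stack, the breakpoints list, the separate slicing pass and the final empty-filter pass with one streaming pass using a depth counter and two indices that emits only non-empty segments directly.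
import Mathlib
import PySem

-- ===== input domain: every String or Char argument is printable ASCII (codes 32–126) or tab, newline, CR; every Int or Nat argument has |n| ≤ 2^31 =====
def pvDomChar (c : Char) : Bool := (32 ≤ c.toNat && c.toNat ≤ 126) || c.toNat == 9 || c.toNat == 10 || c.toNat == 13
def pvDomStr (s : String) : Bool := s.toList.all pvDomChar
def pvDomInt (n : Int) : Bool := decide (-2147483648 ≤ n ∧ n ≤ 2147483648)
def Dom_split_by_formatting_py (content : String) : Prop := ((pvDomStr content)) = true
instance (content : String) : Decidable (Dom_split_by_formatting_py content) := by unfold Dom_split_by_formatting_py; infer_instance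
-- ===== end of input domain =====

-- B replaces A's stack + breakpoints + slicing pass + empty-filter pass by one streaming
-- pass with a depth counter and two indices, emitting only non-empty segments (simpler).

-- Python slice content[a:b] for natural a, b: exact by PySem.List.slice_natCast.
def pvSlice (cs : List Char) (a b : Nat) : List Char := (cs.drop a).take (b - a)

-- ===== PORT A =====
-- first loop of A: stack kept in push-front order (Python append/pop at the end)
def pvA_loop : List Char → Nat → List Nat → List (Nat × Nat) → List Nat × List (Nat × Nat)
  | [], _, stack, bps => (stack, bps)
  | c :: rest, i, stack, bps =>
    if c = '{' then pvA_loop rest (i + 1) (i :: stack) bps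
    else
      match stack with
      | e :: s' =>
        if c = '}' then
          if s' = [] then pvA_loop rest (i + 1) s' (bps ++ [(e, i + 1)])
          else pvA_loop rest (i + 1) s' bps
        else pvA_loop rest (i + 1) (e :: s') bps
      | [] => pvA_loop rest (i + 1) [] bps

-- second loop of A: (sections, step) folded over the breakpoints
def pvA_phase2step (cs : List Char) (st : List (List Char × Bool) × Nat) (bp : Nat × Nat) :
    List (List Char × Bool) × Nat :=
  (st.1 ++ [(pvSlice cs st.2 bp.1, false), (pvSlice cs bp.1 bp.2, true)], bp.2)

def pvA_assemble (cs : List Char) (bps : List (Nat × Nat)) : List (List Char × Bool) :=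
  let st := bps.foldl (pvA_phase2step cs) ([], 0)
  st.1 ++ [(cs.drop st.2, false)]

def split_by_formatting_py (content : String) : List (String × Bool) :=
  let cs := content.toList
  let r := pvA_loop cs 0 [] []
  -- final comprehension: drop empty sections
  ((pvA_assemble cs r.2).filter (fun p => !p.1.isEmpty)).map (fun p => (String.ofList p.1, p.2))

-- ===== PORT B =====
-- single pass of B: depth counter, format_start, text_start, sections accumulator
def pvB_loop (cs : List Char) : List Char → Nat → Nat → Nat → Nat →
    List (List Char × Bool) → List (List Char × Bool) × Nat
  | [], _, _, _, ts, acc => (acc, ts)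
  | c :: rest, i, depth, fs, ts, acc =>
    if c = '{' then pvB_loop cs rest (i + 1) (depth + 1) (if depth = 0 then i else fs) ts acc
    else if c = '}' ∧ 0 < depth then
      if depth = 1 then
        pvB_loop cs rest (i + 1) 0 fs (i + 1)
          (acc ++ (if ts < fs then [(pvSlice cs ts fs, false)] else []) ++
            [(pvSlice cs fs (i + 1), true)])
      else pvB_loop cs rest (i + 1) (depth - 1) fs ts acc
    else pvB_loop cs rest (i + 1) depth fs ts acc

def split_by_formatting_py_alt (content : String) : List (String × Bool) :=
  let cs := content.toList
  let r := pvB_loop cs cs 0 0 0 0 []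
  (if r.2 < cs.length then r.1 ++ [(cs.drop r.2, false)] else r.1).map
    (fun p => (String.ofList p.1, p.2))

-- ===== PRECONDITION & SPEC =====
def Spec_split_by_formatting_py (content : String) (out : List (String × Bool)) : Prop := out = split_by_formatting_py_alt content
instance (content : String) (out : List (String × Bool)) : Decidable (Spec_split_by_formatting_py content out) := by unfold Spec_split_by_formatting_py; infer_instance

-- ===== CLAIM (what is proved, stated in full; the proofs are below) =====
def Claim_equal_split_by_formatting_py : Prop := ∀ (content : String), Dom_split_by_formatting_py content → Spec_split_by_formatting_py content (split_by_formatting_py content)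

-- ===== LEMMAS AND PROOFS =====

-- the text slice cs[ts:fs] is non-empty iff ts < fs (under ts ≤ fs < cs.length)
theorem pvSlice_isEmpty_iff (cs : List Char) (a b : Nat) (hab : a ≤ b) (hb : a < cs.length) :
    (pvSlice cs a b).isEmpty = true ↔ ¬ a < b := by
  simp only [pvSlice, List.isEmpty_iff, List.take_eq_nil_iff, List.drop_eq_nil_iff]
  omega

theorem pv_main (cs : List Char) (l : List Char) :
    ∀ (i depth fs ts : Nat) (stack : List Nat) (bps : List (Nat × Nat))
      (acc : List (List Char × Bool)),
    i + l.length = cs.length →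
    stack.length = depth →
    (depth ≠ 0 → stack.getLast? = some fs ∧ ts ≤ fs ∧ fs < i) →
    ts ≤ i →
    (bps.foldl (pvA_phase2step cs) ([], 0)).2 = ts →
    ((bps.foldl (pvA_phase2step cs) ([], 0)).1.filter (fun p => !p.1.isEmpty)) = acc →
    ((pvA_assemble cs (pvA_loop l i stack bps).2).filter (fun p => !p.1.isEmpty))
      = (let r := pvB_loop cs l i depth fs ts acc;
         if r.2 < cs.length then r.1 ++ [(cs.drop r.2, false)] else r.1) := by
  induction l with
  | nil =>
    intro i depth fs ts stack bps acc Hlen H1 H2 Hts H3a H3b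
    simp only [pvA_loop, pvB_loop, pvA_assemble]
    rw [List.filter_append, H3b, H3a]
    by_cases h : ts < cs.length
    · have he : ¬ ((cs.drop ts).isEmpty = true) := by
        simp only [List.isEmpty_iff, List.drop_eq_nil_iff]; omega
      simp [h, he]
    · have he : (cs.drop ts).isEmpty = true := by
        simp only [List.isEmpty_iff, List.drop_eq_nil_iff]; omega
      simp [h, he]
  | cons c rest ih =>
    intro i depth fs ts stack bps acc Hlen H1 H2 Hts H3a H3b
    simp only [List.length_cons] at Hlen
    by_cases hc : c = '{'
    · -- opening brace
      by_cases hd : depth = 0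
      · have hstack : stack = [] := List.eq_nil_of_length_eq_zero (by omega)
        subst hstack
        simp only [pvA_loop, pvB_loop, hc, hd, if_true]
        exact ih (i + 1) 1 i ts [i] bps acc (by omega) (by simp)
          (fun _ => ⟨rfl, Hts, by omega⟩) (by omega) H3a H3b
      · have hstack : stack ≠ [] := by
          intro h; subst h; simp at H1; omega
        obtain ⟨hlast, hts_fs, hfs_i⟩ := H2 hd
        simp only [pvA_loop, pvB_loop, hc, hd, if_true, if_false]
        refine ih (i + 1) (depth + 1) fs ts (i :: stack) bps acc (by omega) (by simp [H1])
          (fun _ => ⟨?_, hts_fs, by omega⟩) (by omega) H3a H3b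
        cases stack with
        | nil => exact absurd rfl hstack
        | cons a t => simpa [List.getLast?_cons_cons] using hlast
    · -- not an opening brace
      cases stack with
      | nil =>
        have hd : depth = 0 := by simpa using H1.symm
        subst hd
        have hB : ¬ (c = '}' ∧ 0 < 0) := by simp
        simp only [pvA_loop, pvB_loop, hc, hB, if_false, reduceIte]
        exact ih (i + 1) 0 fs ts [] bps acc (by omega) rfl (by simp) (by omega) H3a H3b
      | cons e s' =>
        have hd : depth = s'.length + 1 := by simpa using H1.symm
        obtain ⟨hlast, hts_fs, hfs_i⟩ := H2 (by omega)
        by_cases hcc : c = '}'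
        · cases s' with
          | nil =>
            have he : fs = e := by
              have := hlast; simp only [List.getLast?_singleton, Option.some.injEq] at this
              exact this.symm
            subst he
            have hd1 : depth = 1 := by simpa using hd
            subst hd1
            have hB : (c = '}' ∧ 0 < 1) := ⟨hcc, by omega⟩
            simp only [pvA_loop, pvB_loop, hcc, hB, if_true]
            have hfold : ((bps ++ [(fs, i + 1)]).foldl (pvA_phase2step cs) ([], 0))
                = ((bps.foldl (pvA_phase2step cs) ([], 0)).1 ++
                    [(pvSlice cs ts fs, false), (pvSlice cs fs (i + 1), true)], i + 1) := by
              rw [List.foldl_append]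
              simp [pvA_phase2step, H3a]
            refine ih (i + 1) 0 fs (i + 1) [] (bps ++ [(fs, i + 1)])
              (acc ++ (if ts < fs then [(pvSlice cs ts fs, false)] else []) ++
                [(pvSlice cs fs (i + 1), true)])
              (by omega) rfl (by simp) (by omega) (by rw [hfold]) ?_
            rw [hfold]
            simp only [List.filter_append, H3b, List.filter_cons, List.filter_nil]
            have hfmt : ¬ ((pvSlice cs fs (i + 1)).isEmpty = true) := by
              rw [pvSlice_isEmpty_iff cs fs (i + 1) (by omega) (by omega)]; omega
            by_cases htf : ts < fs
            · have ht : ¬ ((pvSlice cs ts fs).isEmpty = true) := by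
                rw [pvSlice_isEmpty_iff cs ts fs (by omega) (by omega)]; omega
              simp [ht, hfmt, htf]
            · have ht : (pvSlice cs ts fs).isEmpty = true := by
                rw [pvSlice_isEmpty_iff cs ts fs (by omega) (by omega)]; omega
              simp [ht, hfmt, htf]
          | cons e2 s2 =>
            have hB : (c = '}' ∧ 0 < depth) := ⟨hcc, by omega⟩
            have hdne : ¬ (depth = 1) := by
              simp only [List.length_cons] at hd; omega
            have hne : ¬ ((e2 :: s2) = ([] : List Nat)) := by simp
            simp only [pvA_loop, pvB_loop, hcc, hB, hdne, hne, if_true, if_false]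
            rw [List.getLast?_cons_cons] at hlast
            refine ih (i + 1) (depth - 1) fs ts (e2 :: s2) bps acc (by omega) ?_
              (fun _ => ⟨hlast, hts_fs, by omega⟩) (by omega) H3a H3b
            simp only [List.length_cons] at hd ⊢; omega
        · have hB : ¬ (c = '}' ∧ 0 < depth) := by simp [hcc]
          simp only [pvA_loop, pvB_loop, hc, hcc, if_false]
          exact ih (i + 1) depth fs ts (e :: s') bps acc (by omega) H1
            (fun _ => ⟨hlast, hts_fs, by omega⟩) (by omega) H3a H3b

-- ===== VERDICT (by name: the statement is the Claim_ definition above) =====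
theorem split_by_formatting_py_spec : Claim_equal_split_by_formatting_py := by
  intro content _
  show split_by_formatting_py content = split_by_formatting_py_alt content
  unfold split_by_formatting_py split_by_formatting_py_alt
  have h := pv_main content.toList content.toList 0 0 0 0 [] [] []
    (by simp) rfl (by simp) (by omega) rfl rfl
  simp only [] at h ⊢
  rw [h]
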